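-- pv_equiv track=rewrite | github.com/open-compass/opencompass | opencompass/summarizers/subjective/compass_arena_bradley_terry.py | flip_dict_levels
-- ===== SOURCE A (Python) =====
-- from typing import Any, Dict, List, Optional, Tuple
--
-- def flip_dict_levels(original_dict: Dict):
--     """Flips the two levels of a nested dictionary so that dict[lvl1][lvl2]
--     becomes dict[lvl2][lvl1].
--
--     Args:
--         original_dict (dict): The original nested dictionary.
--
--     Returns:
--         dict: The flipped dictionary.
--     """
--     flipped_dict = {}
--     for lvl1, lvl2_dict in original_dict.items():
--         for lvl2, value in lvl2_dict.items():
--             if lvl2 not in flipped_dict: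
--                 flipped_dict[lvl2] = {}
--             flipped_dict[lvl2][lvl1] = value
--
--     return flipped_dict
-- ===== SOURCE B (Python) =====
-- def flip_dict_levels(original_dict):
--     """Flips the two levels of a nested dictionary so that dict[lvl1][lvl2]
--     becomes dict[lvl2][lvl1]."""
--     lvl2_keys = dict.fromkeys(
--         lvl2 for lvl2_dict in original_dict.values() for lvl2 in lvl2_dict)
--     return {
--         lvl2: {lvl1: lvl2_dict[lvl2]
--                for lvl1, lvl2_dict in original_dict.items() if lvl2 in lvl2_dict}
--         for lvl2 in lvl2_keys
--     }
-- ===== Notes on version B (the rewrite author's own statement) =====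
-- stated objective: alternative
-- what changed: Instead of A's single forward pass that grows and mutates nested dicts entry by entry, B first collects the distinct second-level keys in first-appearance order, then builds each output row in one shot by rescanning the outer dict with a membership guard (two comprehensions, no mutation).
import Mathlib
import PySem

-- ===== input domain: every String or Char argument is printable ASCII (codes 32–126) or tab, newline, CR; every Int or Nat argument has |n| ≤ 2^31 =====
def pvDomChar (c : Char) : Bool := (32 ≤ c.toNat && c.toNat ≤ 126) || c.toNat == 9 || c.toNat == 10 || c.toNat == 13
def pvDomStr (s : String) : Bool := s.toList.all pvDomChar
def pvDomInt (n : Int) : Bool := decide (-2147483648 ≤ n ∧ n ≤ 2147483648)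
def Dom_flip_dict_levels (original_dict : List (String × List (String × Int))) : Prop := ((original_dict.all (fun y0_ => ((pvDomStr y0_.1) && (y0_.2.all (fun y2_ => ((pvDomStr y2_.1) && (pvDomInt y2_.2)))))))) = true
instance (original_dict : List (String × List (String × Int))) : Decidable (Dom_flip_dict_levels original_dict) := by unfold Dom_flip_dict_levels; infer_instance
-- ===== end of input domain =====

-- B builds the flipped dict by first collecting the distinct second-level keys and then
-- rescanning the outer dict once per such key (alternative decomposition, no nested mutation).

-- ===== PORT A =====
-- literal transliteration of A: one forward pass, growing/mutating a dict of dicts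
def flip_dict_levels (original_dict : List (String × List (String × Int))) : List (String × List (String × Int)) :=
  let flipped : PySem.Dict String (PySem.Dict String Int) :=
    original_dict.foldl (fun fd p =>
      p.2.foldl (fun fd q =>
        let fd1 := if fd.contains q.1 then fd else fd.insert q.1 PySem.Dict.empty
        fd1.insert q.1 ((fd1.getD q.1 PySem.Dict.empty).insert p.1 q.2)) fd)
      PySem.Dict.empty
  flipped.items.map (fun kv => (kv.1, kv.2.items))

-- ===== PORT B =====
-- literal transliteration of B: dict.fromkeys over all inner keys, then one comprehension per key
def flip_dict_levels_alt (original_dict : List (String × List (String × Int))) : List (String × List (String × Int)) :=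
  let lvl2_keys : List String :=
    PySem.List.dedup (original_dict.flatMap (fun p => p.2.map (fun q => q.1)))
  lvl2_keys.map (fun k2 =>
    (k2, original_dict.filterMap (fun p => (p.2.lookup k2).map (fun v => (p.1, v)))))

-- ===== PRECONDITION & SPEC =====
-- Pre_ admits exactly the association lists that represent a Python dict of dicts: keys
-- duplicate-free at both levels. A duplicate key cannot arise from any Python dict input,
-- so nothing A is ever called on is excluded.
def Pre_flip_dict_levels (original_dict : List (String × List (String × Int))) : Prop :=
  (original_dict.map Prod.fst).Nodup ∧ ∀ p ∈ original_dict, (p.2.map Prod.fst).Nodup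
instance (original_dict : List (String × List (String × Int))) : Decidable (Pre_flip_dict_levels original_dict) := by unfold Pre_flip_dict_levels; infer_instance
def pvWitness_flip_dict_levels : (List (String × List (String × Int))) := [("a", [("x", 1), ("y", 2)]), ("b", [("x", 3)])]

def Spec_flip_dict_levels (original_dict : List (String × List (String × Int))) (out : List (String × List (String × Int))) : Prop := out = flip_dict_levels_alt original_dict
instance (original_dict : List (String × List (String × Int))) (out : List (String × List (String × Int))) : Decidable (Spec_flip_dict_levels original_dict out) := by unfold Spec_flip_dict_levels; infer_instance

-- ===== CLAIM (what is proved, stated in full; the proofs are below) =====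
def Claim_equal_flip_dict_levels : Prop := ∀ (original_dict : List (String × List (String × Int))), Dom_flip_dict_levels original_dict → Pre_flip_dict_levels original_dict → Spec_flip_dict_levels original_dict (flip_dict_levels original_dict)


-- ===== LEMMAS AND PROOFS =====

-- the stream of (lvl1, lvl2, value) triples A's two nested loops process, in order
def pvTs (od : List (String × List (String × Int))) : List (String × String × Int) :=
  od.flatMap (fun p => p.2.map (fun q => (p.1, q.1, q.2)))

-- A's loop body, simplified: the ensure-key-then-set pair is one insert
def pvStep (d : PySem.Dict String (PySem.Dict String Int)) (t : String × String × Int) :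
    PySem.Dict String (PySem.Dict String Int) :=
  d.insert t.2.1 ((d.getD t.2.1 PySem.Dict.empty).insert t.1 t.2.2)

lemma pvStep_eq (d : PySem.Dict String (PySem.Dict String Int)) (k1 : String) (q : String × Int) :
    (let fd1 := if d.contains q.1 then d else d.insert q.1 PySem.Dict.empty
     fd1.insert q.1 ((fd1.getD q.1 PySem.Dict.empty).insert k1 q.2)) = pvStep d (k1, q.1, q.2) := by
  by_cases hc : d.contains q.1
  · simp [hc, pvStep]
  · simp only [hc, Bool.false_eq_true, if_false, pvStep]
    rw [PySem.Dict.getD_insert_self, PySem.Dict.insert_insert_self,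
        PySem.Dict.getD_of_not_contains (h := by simpa using hc)]

lemma pvFold_flatten (od : List (String × List (String × Int)))
    (d : PySem.Dict String (PySem.Dict String Int)) :
    od.foldl (fun fd p =>
      p.2.foldl (fun fd q =>
        let fd1 := if fd.contains q.1 then fd else fd.insert q.1 PySem.Dict.empty
        fd1.insert q.1 ((fd1.getD q.1 PySem.Dict.empty).insert p.1 q.2)) fd) d
    = (pvTs od).foldl pvStep d := by
  induction od generalizing d with
  | nil => rfl
  | cons p rest ih =>
    simp only [List.foldl_cons, pvTs, List.flatMap_cons, List.foldl_append, List.foldl_map]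
    rw [← pvTs, ih]
    congr 1
    apply PySem.List.foldl_congr_mem
    intro acc q _
    exact pvStep_eq acc p.1 q

lemma pvGetD_fold (ts : List (String × String × Int)) (d : PySem.Dict String (PySem.Dict String Int))
    (b : String)
    (h : ((d.getD b PySem.Dict.empty).keys ++ (ts.filter (fun t => t.2.1 == b)).map Prod.fst).Nodup) :
    (ts.foldl pvStep d).getD b PySem.Dict.empty
      = PySem.Dict.mk ((d.getD b PySem.Dict.empty).items
          ++ (ts.filter (fun t => t.2.1 == b)).map (fun t => (t.1, t.2.2))) := by
  induction ts generalizing d with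
  | nil => simp
  | cons t rest ih =>
    simp only [List.foldl_cons]
    by_cases hb : t.2.1 = b
    · subst hb
      have hfresh : t.1 ∉ (d.getD t.2.1 PySem.Dict.empty).keys := by
        intro hm
        rw [List.filter_cons, if_pos (by simp)] at h
        have := (List.nodup_append.mp h).2.2
        exact this t.1 hm t.1 (List.mem_map.mpr ⟨t, List.mem_cons_self, rfl⟩) rfl
      have hnc : (d.getD t.2.1 PySem.Dict.empty).contains t.1 = false := by
        rw [Bool.eq_false_iff]
        intro hc
        exact hfresh ((PySem.Dict.contains_iff_mem_keys _ _).mp hc)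
      have hget : (pvStep d t).getD t.2.1 PySem.Dict.empty
          = (d.getD t.2.1 PySem.Dict.empty).insert t.1 t.2.2 := by
        simp only [pvStep, PySem.Dict.getD_insert_self]
      rw [ih]
      · rw [hget, PySem.Dict.items_insert_of_not_contains (h := hnc),
            List.filter_cons, if_pos (by simp)]
        simp
      · rw [hget, PySem.Dict.keys_insert_of_not_contains (h := hnc)]
        rw [List.filter_cons, if_pos (by simp)] at h
        simpa [List.append_assoc] using h
    · have hget : (pvStep d t).getD b PySem.Dict.empty = d.getD b PySem.Dict.empty := by
        simp only [pvStep]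
        rw [PySem.Dict.getD_insert_of_ne (hne := fun hh => hb hh.symm)]
      rw [ih]
      · rw [hget, List.filter_cons, if_neg (by simpa using hb)]
      · rw [hget]
        rwa [List.filter_cons, if_neg (by simpa using hb)] at h

lemma pvInner_filter (inner : List (String × Int)) (b : String)
    (h : (inner.map Prod.fst).Nodup) :
    inner.filter (fun q => q.1 == b) = (inner.lookup b).toList.map (fun v => (b, v)) := by
  induction inner with
  | nil => rfl
  | cons q rest ih =>
    simp only [List.map_cons, List.nodup_cons] at h
    by_cases hk : q.1 = b
    · subst hk
      rw [List.filter_cons, if_pos (by simp), List.lookup_cons]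
      have hrest : rest.filter (fun p => p.1 == q.1) = [] := by
        rw [List.filter_eq_nil_iff]
        intro x hx
        simp only [beq_iff_eq]
        intro hxb
        exact h.1 (by rw [← hxb]; exact List.mem_map.mpr ⟨x, hx, rfl⟩)
      rw [hrest]
      simp
    · rw [List.filter_cons, if_neg (by simpa using hk), List.lookup_cons,
          show (b == q.1) = false from by simp [Ne.symm hk]]
      exact ih h.2

-- B's column for key b, written over the triple stream
lemma pvColumn_eq (od : List (String × List (String × Int))) (b : String)
    (h : ∀ p ∈ od, (p.2.map Prod.fst).Nodup) :
    ((pvTs od).filter (fun t => t.2.1 == b)).map (fun t => (t.1, t.2.2))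
      = od.filterMap (fun p => (p.2.lookup b).map (fun v => (p.1, v))) := by
  induction od with
  | nil => rfl
  | cons p rest ih =>
    simp only [pvTs, List.flatMap_cons, List.filter_append, List.map_append]
    rw [← pvTs, ih (fun x hx => h x (List.mem_cons_of_mem _ hx))]
    have hblock : ((p.2.map (fun q => (p.1, q.1, q.2))).filter (fun t => t.2.1 == b)).map
        (fun t => (t.1, t.2.2))
        = ((p.2.filter (fun q => q.1 == b)).map (fun q => (p.1, q.2))) := by
      simp [List.filter_map, List.map_map, Function.comp_def]
    rw [hblock, pvInner_filter p.2 b (h p List.mem_cons_self), List.filterMap_cons]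
    cases hl : p.2.lookup b <;> simp

lemma pvColumn_fst_sublist (od : List (String × List (String × Int))) (b : String) :
    ((od.filterMap (fun p => (p.2.lookup b).map (fun v => (p.1, v)))).map Prod.fst).Sublist
      (od.map Prod.fst) := by
  induction od with
  | nil => simp
  | cons p rest ih =>
    rw [List.filterMap_cons, List.map_cons]
    cases hl : p.2.lookup b with
    | none => exact ih.cons _
    | some v => simpa using ih.cons₂ p.1

-- ===== VERDICT (by name: the statement is the Claim_ definition above) =====
theorem flip_dict_levels_spec : Claim_equal_flip_dict_levels := by
  intro od _ hpre
  have hA : flip_dict_levels od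
      = ((pvTs od).foldl pvStep PySem.Dict.empty).items.map (fun kv => (kv.1, kv.2.items)) := by
    unfold flip_dict_levels
    rw [pvFold_flatten]
  unfold Spec_flip_dict_levels flip_dict_levels_alt
  rw [hA]
  set G := (pvTs od).foldl pvStep PySem.Dict.empty with hGdef
  have hnodup : G.keys.Nodup :=
    PySem.Dict.nodup_keys_foldl_insert_key (l := pvTs od) (key := fun t => t.2.1)
      (f := fun d t => (d.getD t.2.1 PySem.Dict.empty).insert t.1 t.2.2)
      (d := PySem.Dict.empty) (h := PySem.Dict.nodup_keys_empty)
  have hkeys : G.keys = PySem.List.dedup (od.flatMap (fun p => p.2.map (fun q => q.1))) := by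
    rw [hGdef,
        show (pvTs od).foldl pvStep (PySem.Dict.empty : PySem.Dict String (PySem.Dict String Int))
          = (pvTs od).foldl (fun d t => d.insert t.2.1
              ((d.getD t.2.1 PySem.Dict.empty).insert t.1 t.2.2)) PySem.Dict.empty from rfl,
        PySem.Dict.keys_foldl_insert_key (l := pvTs od) (key := fun t => t.2.1)
          (f := fun d t => (d.getD t.2.1 PySem.Dict.empty).insert t.1 t.2.2)
          (d := PySem.Dict.empty),
        PySem.List.dedup_eq_ofList]
    have hm : (pvTs od).map (fun t => t.2.1) = od.flatMap (fun p => p.2.map (fun q => q.1)) := by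
      simp [pvTs, List.map_flatMap, List.map_map, Function.comp_def]
    rw [show (PySem.Dict.empty : PySem.Dict String (PySem.Dict String Int)).keys = [] from rfl]
    rw [show PySem.Set.update ([] : List String) ((pvTs od).map (fun t => t.2.1))
          = PySem.Set.ofList ((pvTs od).map (fun t => t.2.1)) from rfl, hm]
  have hcol : ∀ b, (G.getD b PySem.Dict.empty).items
      = od.filterMap (fun p => (p.2.lookup b).map (fun v => (p.1, v))) := by
    intro b
    have hnodupcol : (((pvTs od).filter (fun t => t.2.1 == b)).map Prod.fst).Nodup := by
      have h1 : ((pvTs od).filter (fun t => t.2.1 == b)).map Prod.fst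
          = (((pvTs od).filter (fun t => t.2.1 == b)).map (fun t => (t.1, t.2.2))).map Prod.fst := by
        simp [List.map_map, Function.comp_def]
      rw [h1, pvColumn_eq od b hpre.2]
      exact (pvColumn_fst_sublist od b).nodup hpre.1
    rw [hGdef, pvGetD_fold (pvTs od) PySem.Dict.empty b
          (by simpa [PySem.Dict.getD_empty] using hnodupcol)]
    simp only [PySem.Dict.getD_empty]
    rw [show (PySem.Dict.empty : PySem.Dict String Int).items = [] from rfl, List.nil_append]
    exact pvColumn_eq od b hpre.2
  rw [PySem.Dict.items_eq_map_keys G hnodup PySem.Dict.empty, List.map_map, hkeys]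
  apply List.map_congr_left
  intro b _
  simp only [Function.comp_def]
  exact congrArg (fun l => (b, l)) (hcol b)
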